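-- pv_equiv track=rewrite | github.com/joshanashakya/dissertation | workspace/dataset/java-python/GeeksForGeeks/2954/A/2.py | highestPower
-- ===== SOURCE A (Python) =====
-- def highestPower(str, lenngth):
--
--     # To store the highest required power of 2
--     ans = 0;
--
--     # Counting number of consecutive zeros
--     # from the end in the given binary string
--     for i in range(lenngth-1,-1,-1):
--         if (str[i] == '0'):
--             ans+=1;
--         else:
--             break;
--     return ans;
-- ===== SOURCE B (Python) =====
-- def highestPower(str, lenngth):
--     # Forward single pass: run-length of the current '0'-run, reset on any other char.
--     ans = 0
--     for i in range(lenngth):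
--         ans = ans + 1 if str[i] == '0' else 0
--     return ans
-- ===== Notes on version B (the rewrite author's own statement) =====
-- stated objective: alternative
-- what changed: Replaces the backward scan-with-break by a forward left-to-right pass that maintains the length of the current run of '0's, resetting it to 0 on any other character; the final run length is the trailing-zero count.
import Mathlib
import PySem

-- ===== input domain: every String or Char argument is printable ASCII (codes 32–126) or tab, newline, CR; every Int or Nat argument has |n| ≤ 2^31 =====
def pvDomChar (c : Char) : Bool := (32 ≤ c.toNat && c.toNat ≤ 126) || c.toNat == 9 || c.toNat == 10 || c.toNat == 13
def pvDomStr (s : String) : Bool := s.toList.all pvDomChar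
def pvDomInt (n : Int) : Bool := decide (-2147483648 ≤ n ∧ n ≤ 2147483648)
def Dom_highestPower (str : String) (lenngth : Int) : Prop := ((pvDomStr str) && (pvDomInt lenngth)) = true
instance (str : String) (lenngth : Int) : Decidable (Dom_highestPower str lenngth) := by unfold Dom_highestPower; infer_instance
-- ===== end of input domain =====

-- B replaces A's backward scan-with-break by a forward pass maintaining the current '0'-run length
-- (reset on any other character); alternative decomposition, same cost class.
-- A raises IndexError when lenngth > len(str); Pre_ excludes exactly those inputs.


-- ===== PORT A =====
-- the for-loop over range(lenngth-1, -1, -1) with its break, ans as accumulator;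
-- str[i] is in range for every visited index under Pre_, so the getD default is never used
def loopA (cs : List Char) (idxs : List Int) (ans : Int) : Int :=
  match idxs with
  | [] => ans
  | i :: rest => if (PySem.List.pyGet? cs i).getD ' ' == '0' then loopA cs rest (ans + 1) else ans

def highestPower (str : String) (lenngth : Int) : Int :=
  loopA str.toList (PySem.List.pyRange (lenngth - 1) (-1) (-1)) 0

-- ===== PORT B =====
-- forward fold over range(lenngth): ans = ans+1 if str[i]=='0' else 0
def highestPower_alt (str : String) (lenngth : Int) : Int :=
  (PySem.List.pyRange 0 lenngth 1).foldl
    (fun ans i => if (PySem.List.pyGet? str.toList i).getD ' ' == '0' then ans + 1 else 0) 0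

-- ===== PRECONDITION & SPEC =====
-- Pre_ excludes exactly the inputs where A raises IndexError (str[lenngth-1] out of range)
def Pre_highestPower (str : String) (lenngth : Int) : Prop := lenngth ≤ (str.length : Int)
instance (str : String) (lenngth : Int) : Decidable (Pre_highestPower str lenngth) := by
  unfold Pre_highestPower; infer_instance

def pvWitness_highestPower : String × Int := ("10100", 5)

def Spec_highestPower (str : String) (lenngth : Int) (out : Int) : Prop := out = highestPower_alt str lenngth
instance (str : String) (lenngth : Int) (out : Int) : Decidable (Spec_highestPower str lenngth out) := by unfold Spec_highestPower; infer_instance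

-- ===== CLAIM (what is proved, stated in full; the proofs are below) =====
def Claim_equal_highestPower : Prop := ∀ (str : String) (lenngth : Int), Dom_highestPower str lenngth → Pre_highestPower str lenngth → Spec_highestPower str lenngth (highestPower str lenngth)

-- ===== LEMMAS AND PROOFS =====

-- A's loop over indices n-1 … 0 counts the trailing '0's of (cs.take n)
lemma loopA_take (cs : List Char) (n : Nat) (hn : n ≤ cs.length) (ans : Int) :
    loopA cs (PySem.List.pyRange ((n : Int) - 1) (-1) (-1)) ans
      = ans + (((cs.take n).reverse.takeWhile (· == '0')).length : Int) := by
  induction n generalizing ans with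
  | zero =>
      rw [PySem.List.pyRange_neg_one_eq_nil (by omega)]
      simp [loopA]
  | succ n ih =>
      have h1 : ((n + 1 : Nat) : Int) - 1 = (n : Int) := by push_cast; ring
      rw [h1, PySem.List.pyRange_neg_one_cons (by omega : (-1 : Int) < (n : Int))]
      have hlt : n < cs.length := by omega
      have hget : PySem.List.pyGet? cs (n : Int) = some cs[n] := by
        simp [PySem.List.pyGet?_natCast, List.getElem?_eq_getElem hlt]
      have htake : cs.take (n + 1) = cs.take n ++ [cs[n]] := by
        rw [List.take_add_one]; simp [List.getElem?_eq_getElem hlt]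
      unfold loopA
      rw [hget, htake]
      simp only [Option.getD_some, List.reverse_append, List.reverse_cons, List.reverse_nil,
        List.nil_append, List.cons_append, List.takeWhile]
      by_cases h0 : cs[n] = '0'
      · simp only [h0, beq_self_eq_true, if_true]
        rw [ih (by omega)]
        simp; ring
      · have : (cs[n] == '0') = false := by simp [h0]
        simp [this]

-- B's forward fold over indices 0 … n-1 also computes the trailing '0'-run of (cs.take n)
lemma foldB_take (cs : List Char) (n : Nat) (hn : n ≤ cs.length) :
    (PySem.List.pyRange 0 (n : Int) 1).foldl
        (fun ans i => if (PySem.List.pyGet? cs i).getD ' ' == '0' then ans + 1 else 0) 0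
      = (((cs.take n).reverse.takeWhile (· == '0')).length : Int) := by
  induction n with
  | zero =>
      rw [PySem.List.pyRange_one_eq_nil (by omega)]
      simp
  | succ n ih =>
      have h1 : ((n + 1 : Nat) : Int) = (n : Int) + 1 := by push_cast; ring
      rw [h1, PySem.List.pyRange_one_succ_right (by omega), List.foldl_append]
      have hlt : n < cs.length := by omega
      have hget : PySem.List.pyGet? cs (n : Int) = some cs[n] := by
        simp [PySem.List.pyGet?_natCast, List.getElem?_eq_getElem hlt]
      have htake : cs.take (n + 1) = cs.take n ++ [cs[n]] := by
        rw [List.take_add_one]; simp [List.getElem?_eq_getElem hlt]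
      rw [ih (by omega), htake]
      simp only [List.foldl_cons, List.foldl_nil, hget, Option.getD_some,
        List.reverse_append, List.reverse_cons, List.reverse_nil,
        List.nil_append, List.cons_append, List.takeWhile]
      by_cases h0 : cs[n] = '0'
      · simp [h0]
      · have : (cs[n] == '0') = false := by simp [h0]
        simp [this]

-- ===== VERDICT =====
theorem highestPower_spec : Claim_equal_highestPower := by
  intro str lenngth _ hpre
  unfold Spec_highestPower highestPower highestPower_alt Pre_highestPower at *
  by_cases hle : lenngth ≤ 0
  · rw [PySem.List.pyRange_neg_one_eq_nil (by omega), PySem.List.pyRange_one_eq_nil (by omega)]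
    simp [loopA]
  · have hn : lenngth = ((lenngth.toNat : Nat) : Int) := by omega
    have hnl : lenngth.toNat ≤ str.toList.length := by
      simpa using (by omega : lenngth.toNat ≤ str.length)
    rw [hn, loopA_take str.toList lenngth.toNat hnl 0, foldB_take str.toList lenngth.toNat hnl]
    ring
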